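-- pv_equiv track=rewrite | github.com/Gaurav882001/Oodles_voice_to_voice | Backend/main.py | is_meaningful_query
-- ===== SOURCE A (Python) =====
-- def is_meaningful_query(query):
--     """
--     Check if the query is meaningful and not just gibberish or very short unclear text
--     """
--     query = query.strip().lower()
--
--     # Check if query is too short and doesn't contain meaningful words
--     if len(query) <= 2:
--         return False
--
--     # List of common gibberish patterns or very unclear single words
--     gibberish_patterns = [
--         'otay', 'emjgr', 'thik', 'hmm', 'uhh', 'umm', 'err', 'ahh', 'ohh',
--         'xyz', 'abc', 'qwe', 'asd', 'zxc', 'dfg', 'hjk', 'vbn', 'mnb',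
--         'test', 'testing', '123', 'hello', 'hi', 'hey'
--     ]
--
--     # Check if query is just gibberish
--     if query in gibberish_patterns:
--         return False
--
--     # Check if query has at least one vowel (basic language structure check)
--     vowels = 'aeiou'
--     if not any(vowel in query for vowel in vowels) and len(query) > 2:
--         # Allow some exceptions for valid consonant-only words
--         valid_consonant_words = ['by', 'my', 'try', 'why', 'sky', 'dry', 'fly', 'cry']
--         if query not in valid_consonant_words:
--             return False
--
--     # Check for random character sequences (more than 3 consecutive consonants)
--     consonants = 'bcdfghjklmnpqrstvwxyz'
--     consonant_count = 0
--     for char in query: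
--         if char in consonants:
--             consonant_count += 1
--             if consonant_count > 3:
--                 return False
--         else:
--             consonant_count = 0
--
--     return True
-- ===== SOURCE B (Python) =====
-- GIBBERISH = [
--     'otay', 'emjgr', 'thik', 'hmm', 'uhh', 'umm', 'err', 'ahh', 'ohh',
--     'xyz', 'abc', 'qwe', 'asd', 'zxc', 'dfg', 'hjk', 'vbn', 'mnb',
--     'test', 'testing', '123', 'hello', 'hi', 'hey'
-- ]
-- CONSONANT_WORDS = ['by', 'my', 'try', 'why', 'sky', 'dry', 'fly', 'cry']
--
-- def is_meaningful_query(query):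
--     q = query.strip().lower()
--     flags = [c in 'bcdfghjklmnpqrstvwxyz' for c in q]
--     return (len(q) > 2
--             and q not in GIBBERISH
--             and (any(v in q for v in 'aeiou') or q in CONSONANT_WORDS)
--             and not any(a and b and c and d
--                         for a, b, c, d in zip(flags, flags[1:], flags[2:], flags[3:])))
-- ===== Notes on version B (the rewrite author's own statement) =====
-- stated objective: alternative
-- what changed: The resettable consonant-counter loop is replaced by a sliding-window scan (any window of 4 consecutive precomputed consonant flags via zip), and the early-return guard chain is collapsed into a single boolean conjunction.
import Mathlib
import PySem

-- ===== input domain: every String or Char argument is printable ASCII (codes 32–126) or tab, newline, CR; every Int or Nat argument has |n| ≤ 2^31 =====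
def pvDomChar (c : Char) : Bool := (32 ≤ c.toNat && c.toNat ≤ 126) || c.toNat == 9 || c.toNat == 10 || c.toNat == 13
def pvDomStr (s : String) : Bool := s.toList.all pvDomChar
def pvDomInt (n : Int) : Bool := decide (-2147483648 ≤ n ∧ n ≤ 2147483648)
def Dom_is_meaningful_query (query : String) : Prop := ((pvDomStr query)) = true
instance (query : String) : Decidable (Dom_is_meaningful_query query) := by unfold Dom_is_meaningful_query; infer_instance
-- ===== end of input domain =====

-- B replaces A's resettable consonant counter by a sliding-window scan over precomputed
-- consonant flags and collapses the early-return chain into one conjunction (objective: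
-- alternative; same cost).

-- shared string literals of both programs
def pvGibberish : List (List Char) :=
  ["otay".toList, "emjgr".toList, "thik".toList, "hmm".toList, "uhh".toList, "umm".toList,
   "err".toList, "ahh".toList, "ohh".toList, "xyz".toList, "abc".toList, "qwe".toList,
   "asd".toList, "zxc".toList, "dfg".toList, "hjk".toList, "vbn".toList, "mnb".toList,
   "test".toList, "testing".toList, "123".toList, "hello".toList, "hi".toList, "hey".toList]
def pvConsWords : List (List Char) :=
  ["by".toList, "my".toList, "try".toList, "why".toList, "sky".toList, "dry".toList,
   "fly".toList, "cry".toList]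
-- `c in 'bcdfghjklmnpqrstvwxyz'` (single char in string = char membership)
def pvIsCons (c : Char) : Bool := "bcdfghjklmnpqrstvwxyz".toList.contains c

-- ===== PORT A =====
-- the `for char in query` loop with its resettable counter and early return
def pvLoopA : List Char → Nat → Bool
  | [], _ => true
  | c :: rest, cnt =>
    if pvIsCons c then
      if cnt + 1 > 3 then false else pvLoopA rest (cnt + 1)
    else pvLoopA rest 0

def is_meaningful_query (query : String) : Bool :=
  let q := PySem.Chars.lower (PySem.Chars.strip query.toList)
  if q.length ≤ 2 then false
  else if pvGibberish.contains q then false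
  else if !("aeiou".toList.any (fun v => q.contains v)) && decide (2 < q.length) then
    if !(pvConsWords.contains q) then false
    else pvLoopA q 0
  else pvLoopA q 0

-- ===== PORT B =====
def is_meaningful_query_alt (query : String) : Bool :=
  let q := PySem.Chars.lower (PySem.Chars.strip query.toList)
  let flags := q.map pvIsCons
  decide (2 < q.length) &&
  !(pvGibberish.contains q) &&
  ("aeiou".toList.any (fun v => q.contains v) || pvConsWords.contains q) &&
  !(((flags.zip (flags.drop 1)).zip ((flags.drop 2).zip (flags.drop 3))).any
      (fun p => p.1.1 && p.1.2 && p.2.1 && p.2.2))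

-- ===== PRECONDITION & SPEC =====
def Spec_is_meaningful_query (query : String) (out : Bool) : Prop := out = is_meaningful_query_alt query
instance (query : String) (out : Bool) : Decidable (Spec_is_meaningful_query query out) := by unfold Spec_is_meaningful_query; infer_instance

-- ===== CLAIM (what is proved, stated in full; the proofs are below) =====
def Claim_equal_is_meaningful_query : Prop := ∀ (query : String), Dom_is_meaningful_query query → Spec_is_meaningful_query query (is_meaningful_query query)

-- ===== LEMMAS AND PROOFS =====

-- `l` starts with at least `n` consonants
def pvPref (n : Nat) (l : List Char) : Bool :=
  decide (n ≤ l.length) && (l.take n).all pvIsCons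

-- reference form of "some window of 4 consecutive true flags"
def pvWin : List Bool → Bool
  | [] => false
  | a :: rest => (a && (decide (3 ≤ rest.length) && (rest.take 3).all id)) || pvWin rest

theorem pvWin_cons (b : Bool) (fl : List Bool) :
    pvWin (b :: fl) = ((b && (decide (3 ≤ fl.length) && (fl.take 3).all id)) || pvWin fl) := rfl

theorem pvFlag3 (rest : List Char) :
    (decide (3 ≤ (rest.map pvIsCons).length) && (((rest.map pvIsCons).take 3).all id)) =
      pvPref 3 rest := by
  have hall : ∀ (l : List Char), (l.map pvIsCons).all id = l.all pvIsCons := by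
    intro l
    induction l with
    | nil => rfl
    | cons a t ih => simp [ih]
  rw [pvPref, ← List.map_take, hall]
  simp

theorem pvPref_mono {m n : Nat} (h : m ≤ n) (l : List Char) (hp : pvPref n l = true) :
    pvPref m l = true := by
  simp only [pvPref, Bool.and_eq_true, decide_eq_true_eq] at hp ⊢
  refine ⟨le_trans h hp.1, ?_⟩
  have ht : l.take m = (l.take n).take m := by rw [List.take_take, Nat.min_eq_left h]
  rw [ht, List.all_eq_true]
  exact fun x hx => List.all_eq_true.1 hp.2 x (List.mem_of_mem_take hx)

theorem pvPref4_win (l : List Char) (hp : pvPref 4 l = true) :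
    pvWin (l.map pvIsCons) = true := by
  cases l with
  | nil => simp [pvPref] at hp
  | cons c rest =>
    rw [List.map_cons, pvWin_cons, pvFlag3]
    simp only [pvPref, Bool.and_eq_true, decide_eq_true_eq, List.length_cons,
      List.take_succ_cons, List.all_cons] at hp
    have h2 : pvPref 3 rest = true := by
      simp only [pvPref, Bool.and_eq_true, decide_eq_true_eq]
      exact ⟨by omega, hp.2.2⟩
    simp [hp.2.1, h2]

theorem pvLoopA_eq (l : List Char) : ∀ cnt : Nat, cnt ≤ 3 →
    pvLoopA l cnt = !(pvPref (4 - cnt) l || pvWin (l.map pvIsCons)) := by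
  induction l with
  | nil =>
    intro cnt h
    simp [pvLoopA, pvPref, pvWin]
    omega
  | cons c rest ih =>
    intro cnt h
    rw [List.map_cons, pvWin_cons, pvFlag3]
    by_cases hc : pvIsCons c = true
    · by_cases h3 : cnt = 3
      · subst h3
        have hp1 : pvPref 1 (c :: rest) = true := by
          simp [pvPref, List.take_succ_cons, hc]
        simp [pvLoopA, hc, show pvPref (4 - 3) (c :: rest) = true from hp1]
      · have hlt : cnt + 1 ≤ 3 := by omega
        have hstep : pvLoopA (c :: rest) cnt = pvLoopA rest (cnt + 1) := by
          simp [pvLoopA, hc]; omega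
        rw [hstep, ih _ hlt]
        have hpref : pvPref (4 - cnt) (c :: rest) = pvPref (3 - cnt) rest := by
          have h4 : 4 - cnt = (3 - cnt) + 1 := by omega
          simp [pvPref, h4, List.take_succ_cons, hc]
        rw [hpref, show 4 - (cnt + 1) = 3 - cnt from by omega, hc, Bool.true_and]
        by_cases hw : pvPref 3 rest = true
        · have hm := pvPref_mono (show 3 - cnt ≤ 3 from by omega) rest hw
          simp [hm, hw]
        · simp only [Bool.not_eq_true] at hw
          simp [hw]
    · simp only [Bool.not_eq_true] at hc
      have hstep : pvLoopA (c :: rest) cnt = pvLoopA rest 0 := by simp [pvLoopA, hc]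
      rw [hstep, ih 0 (by omega)]
      have hpref : pvPref (4 - cnt) (c :: rest) = false := by
        obtain ⟨m, hm⟩ : ∃ m, 4 - cnt = m + 1 := ⟨3 - cnt, by omega⟩
        simp [pvPref, hm, List.take_succ_cons, hc]
      rw [hpref, hc]
      simp only [Bool.false_and, Bool.false_or]
      by_cases hw : pvPref 4 rest = true
      · simp [hw, pvPref4_win rest hw]
      · simp only [Bool.not_eq_true] at hw
        simp [hw]

theorem pvLoopA_zero (l : List Char) :
    pvLoopA l 0 = !pvWin (l.map pvIsCons) := by
  rw [pvLoopA_eq l 0 (by omega)]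
  by_cases hw : pvPref 4 l = true
  · simp [hw, pvPref4_win l hw]
  · simp only [Bool.not_eq_true] at hw
    simp [hw]

theorem pvZip_eq_win (fl : List Bool) :
    ((fl.zip (fl.drop 1)).zip ((fl.drop 2).zip (fl.drop 3))).any
      (fun p => p.1.1 && p.1.2 && p.2.1 && p.2.2) = pvWin fl := by
  induction fl with
  | nil => rfl
  | cons a rest ih =>
    match rest with
    | [] => simp [pvWin]
    | [b] => simp [pvWin]
    | [b, c] => simp [pvWin]
    | b :: c :: d :: t =>
      simp only [List.drop, List.zip_cons_cons, List.any_cons] at ih ⊢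
      rw [ih]
      simp [pvWin, Bool.and_assoc]

theorem is_meaningful_query_eq (query : String) :
    is_meaningful_query query = is_meaningful_query_alt query := by
  unfold is_meaningful_query is_meaningful_query_alt
  simp only [pvZip_eq_win]
  set q := PySem.Chars.lower (PySem.Chars.strip query.toList) with hq
  by_cases h2 : q.length ≤ 2
  · have hgt : decide (2 < q.length) = false := by
      simp only [decide_eq_false_iff_not]
      omega
    rw [if_pos h2, hgt]
    simp only [Bool.false_and]
  · have hgt : decide (2 < q.length) = true := by
      simp only [decide_eq_true_eq]
      omega
    rw [if_neg h2]
    cases hg : pvGibberish.contains q with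
    | true =>
      rw [hgt]
      simp only [pvLoopA_zero, Bool.not_true, Bool.not_false, Bool.false_and, Bool.true_and, Bool.and_false, Bool.and_true, Bool.true_or, Bool.false_or, reduceIte] <;> simp
    | false =>
      cases hv : ("aeiou".toList.any fun v => q.contains v) with
      | true =>
        rw [hgt]
        simp only [pvLoopA_zero, Bool.not_true, Bool.not_false, Bool.false_and, Bool.true_and, Bool.and_false, Bool.and_true, Bool.true_or, Bool.false_or, reduceIte] <;> simp
      | false =>
        cases hc : pvConsWords.contains q with
        | true =>
          rw [hgt]
          simp only [pvLoopA_zero, Bool.not_true, Bool.not_false, Bool.false_and, Bool.true_and, Bool.and_false, Bool.and_true, Bool.true_or, Bool.false_or, reduceIte] <;> simp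
        | false =>
          rw [hgt]
          simp only [pvLoopA_zero, Bool.not_true, Bool.not_false, Bool.false_and, Bool.true_and, Bool.and_false, Bool.and_true, Bool.true_or, Bool.false_or, reduceIte] <;> simp

-- ===== VERDICT (by name: the statement is the Claim_ definition above) =====
theorem is_meaningful_query_spec : Claim_equal_is_meaningful_query := by
  intro query _
  unfold Spec_is_meaningful_query
  exact is_meaningful_query_eq query
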